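-- pv_equiv track=rewrite | github.com/ymrs66/mahjang | meld_checker.py | check_4_melds
-- ===== SOURCE A (Python) =====
-- def check_4_melds(tiles_12):
--     # ベースケース
--     if len(tiles_12) == 0:
--         return True
--
--     # 先頭牌を取り出す (タプル: (suit_id, val))
--     first = tiles_12[0]
--
--     # (1) 刻子チェック
--     if tiles_12.count(first) >= 3:
--         # 先頭と同じ牌3枚を除去
--         new_list = remove_three_tiles(tiles_12, first, first, first)
--         if new_list is not None and check_4_melds(new_list):
--             return True
--
--     # (2) 順子チェック
--     suit_id, val = first
--     # 先頭が字牌(suit_id==3)だったら順子は作れない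
--     if suit_id < 3:
--         # is_sequence_possible(tiles_12) も suit_id/val をチェックしているならOK
--         if is_sequence_possible(tiles_12):
--             new_list = remove_sequence(tiles_12,
--                                        (suit_id, val),
--                                        (suit_id, val + 1),
--                                        (suit_id, val + 2))
--             if new_list is not None and check_4_melds(new_list):
--                 return True
--
--     # 失敗
--     return False
--
-- def remove_three_tiles(original_list, val1, val2, val3):
--     """
--     original_list から val1, val2, val3 という値を1枚ずつ取り除いた新リストを返す。
--
--     例えば:
--       - 刻子: val1 == val2 == val3
--       - 順子: val2 == val1+1, val3 == val1+2
--     """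
--     new_list = original_list[:]
--
--     # val1, val2, val3 をそれぞれ new_list から1回だけ削除
--     for v in (val1, val2, val3):
--         if v in new_list:
--             new_list.remove(v)
--         else:
--             # v が見つからなければ取り除けない(エラー or そのままリターンなど)
--             return None  # 取り除き失敗を示す
--
--     return new_list
--
-- def is_sequence_possible(tiles_list):
--     """
--     tiles_list は [(suit_id, val), (suit_id, val), ...]
--     先頭要素を first = tiles_list[0] として
--     同じ suit_id で val, val+1, val+2 が含まれているかチェック
--     """
--     if not tiles_list:
--         return False
--
--     suit_id, val = tiles_list[0]
--
--     # 字牌は順子不可なので suit_id==3 のときはFalse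
--     if suit_id == 3:
--         return False
--
--     return ((suit_id, val+1) in tiles_list) and ((suit_id, val+2) in tiles_list)
--
-- def remove_sequence(original_list, val1, val2, val3):
--     """ original_list から (val1, val2, val3) を1回ずつ取り除いた新リストを返す """
--     return remove_three_tiles(original_list, val1, val2, val3)
-- ===== SOURCE B (Python) =====
-- def check_4_melds(tiles_12):
--     cache = {}
--
--     def drop_first(state, targets):
--         # remove the first occurrence of each target in one pass
--         need = {}
--         for t in targets:
--             need[t] = need.get(t, 0) + 1
--         out = []
--         for t in state:
--             if need.get(t, 0) > 0:
--                 need[t] = need.get(t, 0) - 1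
--             else:
--                 out.append(t)
--         return tuple(out)
--
--     def solve(state):
--         if not state:
--             return True
--         if state in cache:
--             return cache[state]
--         first = state[0]
--         s, v = first
--         cnt = 0
--         has1 = has2 = False
--         for t in state:
--             if t == first:
--                 cnt += 1
--             elif t == (s, v + 1):
--                 has1 = True
--             elif t == (s, v + 2):
--                 has2 = True
--         res = False
--         if cnt >= 3:
--             res = solve(drop_first(state, (first, first, first)))
--         if (not res) and s < 3 and has1 and has2:
--             res = solve(drop_first(state, (first, (s, v + 1), (s, v + 2))))
--         cache[state] = res
--         return res
--
--     return solve(tuple(tiles_12))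
-- ===== Notes on version B (the rewrite author's own statement) =====
-- stated objective: alternative
-- what changed: Replaces A's naive exponential backtracking (with separate count/membership scans and three sequential list.remove passes per step) by a memoized DFS over tuple states that gathers the triplet count and both sequence memberships in one scan and removes all three meld tiles in a single counter-guided pass.
import Mathlib
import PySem

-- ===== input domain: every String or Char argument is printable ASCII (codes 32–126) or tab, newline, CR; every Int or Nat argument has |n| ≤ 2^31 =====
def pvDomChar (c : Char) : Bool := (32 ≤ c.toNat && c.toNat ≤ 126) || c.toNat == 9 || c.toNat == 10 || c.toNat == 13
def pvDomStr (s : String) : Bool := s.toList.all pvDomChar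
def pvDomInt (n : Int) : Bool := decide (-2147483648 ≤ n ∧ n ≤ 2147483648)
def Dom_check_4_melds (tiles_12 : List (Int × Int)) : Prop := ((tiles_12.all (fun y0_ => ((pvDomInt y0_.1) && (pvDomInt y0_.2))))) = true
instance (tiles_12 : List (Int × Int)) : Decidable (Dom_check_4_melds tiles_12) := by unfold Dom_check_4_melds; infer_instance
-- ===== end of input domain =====

-- B replaces A's naive backtracking (repeated count/in scans and three sequential `remove` passes
-- per step) by a memoized DFS (one counting scan, one counter-guided removal pass per state);
-- same return value on every input (A is total).

-- ===== PORT A =====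
def removeThreeTiles (original_list : List (Int × Int)) (v1 v2 v3 : Int × Int) :
    Option (List (Int × Int)) :=
  -- for v in (v1, v2, v3): if v in new_list: new_list.remove(v) else: return None
  match PySem.List.remove? original_list v1 with
  | none => none
  | some l1 =>
    match PySem.List.remove? l1 v2 with
    | none => none
    | some l2 =>
      match PySem.List.remove? l2 v3 with
      | none => none
      | some l3 => some l3

def isSequencePossible (tiles_list : List (Int × Int)) : Bool :=
  match tiles_list with
  | [] => false
  | (s, v) :: rest =>
    if s == 3 then false
    else decide ((s, v + 1) ∈ (s, v) :: rest) && decide ((s, v + 2) ∈ (s, v) :: rest)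

-- termination helper for the port (cited by decreasing_by)
lemma length_of_remove?_eq_some {xs : List (Int × Int)} {v : Int × Int} {nl : List (Int × Int)}
    (h : PySem.List.remove? xs v = some nl) : nl.length + 1 = xs.length := by
  have hv : v ∈ xs := by
    by_contra hv
    rw [← PySem.List.remove?_eq_none_iff xs v] at hv
    simp [hv] at h
  rw [PySem.List.remove?_eq_some_erase xs v hv] at h
  cases h
  have := List.length_pos_of_mem hv
  have := List.length_erase_of_mem hv
  omega

lemma length_of_removeThree {l nl : List (Int × Int)} {a b c : Int × Int}
    (h : removeThreeTiles l a b c = some nl) : nl.length + 3 = l.length := by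
  unfold removeThreeTiles at h
  cases h1 : PySem.List.remove? l a with
  | none => simp only [h1] at h; exact absurd h (by simp)
  | some l1 =>
    simp only [h1] at h
    cases h2 : PySem.List.remove? l1 b with
    | none => simp only [h2] at h; exact absurd h (by simp)
    | some l2 =>
      simp only [h2] at h
      cases h3 : PySem.List.remove? l2 c with
      | none => simp only [h3] at h; exact absurd h (by simp)
      | some l3 =>
        simp only [h3, Option.some.injEq] at h
        subst h
        have e1 := length_of_remove?_eq_some h1
        have e2 := length_of_remove?_eq_some h2
        have e3 := length_of_remove?_eq_some h3
        omega

def check_4_melds (tiles_12 : List (Int × Int)) : Bool :=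
  match tiles_12 with
  | [] => true
  | first :: rest =>
    (if 3 ≤ (first :: rest).count first then
       match h : removeThreeTiles (first :: rest) first first first with
       | some nl => check_4_melds nl
       | none => false
     else false)
    ||
    (if first.1 < 3 then
       if isSequencePossible (first :: rest) then
         match h : removeThreeTiles (first :: rest) first (first.1, first.2 + 1)
             (first.1, first.2 + 2) with
         | some nl => check_4_melds nl
         | none => false
       else false
     else false)
termination_by tiles_12.length
decreasing_by
  · have := length_of_removeThree h; simp only [List.length_cons] at this ⊢; omega
  · have := length_of_removeThree h; simp only [List.length_cons] at this ⊢; omega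

-- ===== PORT B =====
def dropStep (acc : PySem.Dict (Int × Int) Int × List (Int × Int)) (t : Int × Int) :
    PySem.Dict (Int × Int) Int × List (Int × Int) :=
  if 0 < acc.1.getD t 0 then (acc.1.insert t (acc.1.getD t 0 - 1), acc.2)
  else (acc.1, acc.2 ++ [t])

def dropFirst (state targets : List (Int × Int)) : List (Int × Int) :=
  let need : PySem.Dict (Int × Int) Int :=
    targets.foldl (fun d t => d.insert t (d.getD t 0 + 1)) PySem.Dict.empty
  (state.foldl dropStep (need, [])).2

def scanStep (t0 : Int × Int) (acc : Int × Bool × Bool) (t : Int × Int) : Int × Bool × Bool :=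
  if t = t0 then (acc.1 + 1, acc.2.1, acc.2.2)
  else if t = (t0.1, t0.2 + 1) then (acc.1, true, acc.2.2)
  else if t = (t0.1, t0.2 + 2) then (acc.1, acc.2.1, true)
  else acc

-- termination helpers for solve (cited by decreasing_by)
lemma foldl_drop_len (l : List (Int × Int)) :
    ∀ (d : PySem.Dict (Int × Int) Int) (out : List (Int × Int)),
      ((l.foldl dropStep (d, out)).2).length ≤ out.length + l.length := by
  induction l with
  | nil => intro d out; simp
  | cons t r ih =>
    intro d out
    simp only [List.foldl_cons, dropStep]
    by_cases hd : 0 < d.getD t 0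
    · rw [if_pos hd]
      have := ih (d.insert t (d.getD t 0 - 1)) out
      simp only [List.length_cons]
      omega
    · rw [if_neg hd]
      have := ih d (out ++ [t])
      simp at this ⊢
      omega

lemma dropFirst_len_lt (t0 : Int × Int) (rest targets : List (Int × Int))
    (h : 0 < targets.count t0) :
    (dropFirst (t0 :: rest) targets).length < (t0 :: rest).length := by
  unfold dropFirst
  have hneed : (targets.foldl (fun d t => d.insert t (d.getD t 0 + 1))
      (PySem.Dict.empty : PySem.Dict (Int × Int) Int)).getD t0 0 = targets.count t0 := by
    rw [PySem.Dict.getD_foldl_insert_add_one]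
    simp
  simp only [List.foldl_cons, dropStep]
  rw [if_pos (by rw [hneed]; exact_mod_cast h)]
  have := foldl_drop_len rest
    ((targets.foldl (fun d t => d.insert t (d.getD t 0 + 1)) PySem.Dict.empty).insert t0
      ((targets.foldl (fun d t => d.insert t (d.getD t 0 + 1)) PySem.Dict.empty).getD t0 0 - 1)) []
  simp only [List.length_nil, Nat.zero_add, List.length_cons] at this ⊢
  omega

def solve : List (Int × Int) → PySem.Dict (List (Int × Int)) Bool →
    Bool × PySem.Dict (List (Int × Int)) Bool
  | [], cache => (true, cache)
  | t0 :: rest, cache =>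
    match cache.get? (t0 :: rest) with
    | some r => (r, cache)
    | none =>
      let scan := (t0 :: rest).foldl (scanStep t0) (0, false, false)
      let p1 := if 3 ≤ scan.1 then solve (dropFirst (t0 :: rest) [t0, t0, t0]) cache
        else (false, cache)
      let p2 := if !p1.1 && decide (t0.1 < 3) && scan.2.1 && scan.2.2 then
          solve (dropFirst (t0 :: rest) [t0, (t0.1, t0.2 + 1), (t0.1, t0.2 + 2)]) p1.2
        else p1
      (p2.1, p2.2.insert (t0 :: rest) p2.1)
termination_by state _ => state.length
decreasing_by
  · exact dropFirst_len_lt _ _ _ (by simp)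
  · exact dropFirst_len_lt _ _ _ (by simp [List.count_cons])

def check_4_melds_alt (tiles_12 : List (Int × Int)) : Bool :=
  (solve tiles_12 PySem.Dict.empty).1

-- ===== PRECONDITION & SPEC =====
def Spec_check_4_melds (tiles_12 : List (Int × Int)) (out : Bool) : Prop := out = check_4_melds_alt tiles_12
instance (tiles_12 : List (Int × Int)) (out : Bool) : Decidable (Spec_check_4_melds tiles_12 out) := by unfold Spec_check_4_melds; infer_instance

-- ===== CLAIM (what is proved, stated in full; the proofs are below) =====
def Claim_equal_check_4_melds : Prop := ∀ (tiles_12 : List (Int × Int)), Dom_check_4_melds tiles_12 → Spec_check_4_melds tiles_12 (check_4_melds tiles_12)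

-- ===== LEMMAS AND PROOFS =====

lemma pair_ne_one (t0 : Int × Int) : (t0.1, t0.2 + 1) ≠ t0 := by
  intro h; rw [Prod.ext_iff] at h; omega

lemma pair_ne_two (t0 : Int × Int) : (t0.1, t0.2 + 2) ≠ t0 := by
  intro h; rw [Prod.ext_iff] at h; omega

lemma pair_ne_onetwo (t0 : Int × Int) : (t0.1, t0.2 + 1) ≠ (t0.1, t0.2 + 2) := by
  intro h; rw [Prod.ext_iff] at h; omega

lemma one_ne_pair (t0 : Int × Int) : t0 ≠ (t0.1, t0.2 + 1) := (pair_ne_one t0).symm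

lemma two_ne_pair (t0 : Int × Int) : t0 ≠ (t0.1, t0.2 + 2) := (pair_ne_two t0).symm

lemma pair_ne_twoone (t0 : Int × Int) : (t0.1, t0.2 + 2) ≠ (t0.1, t0.2 + 1) :=
  (pair_ne_onetwo t0).symm

lemma scan_spec (t0 : Int × Int) (l : List (Int × Int)) :
    ∀ (c : Int) (b1 b2 : Bool),
      l.foldl (scanStep t0) (c, b1, b2) =
        (c + l.count t0, b1 || decide ((t0.1, t0.2 + 1) ∈ l), b2 || decide ((t0.1, t0.2 + 2) ∈ l)) := by
  induction l with
  | nil => intro c b1 b2; simp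
  | cons t r ih =>
    intro c b1 b2
    simp only [List.foldl_cons, scanStep]
    by_cases h0 : t = t0
    · subst h0
      rw [if_pos rfl, ih]
      simp [List.count_cons, pair_ne_one, pair_ne_two, one_ne_pair, two_ne_pair]
      omega
    · rw [if_neg h0]
      by_cases h1 : t = (t0.1, t0.2 + 1)
      · subst h1
        rw [if_pos rfl, ih]
        simp [List.count_cons, pair_ne_one, pair_ne_onetwo, pair_ne_twoone, h0, Ne.symm h0]
      · rw [if_neg h1]
        by_cases h2 : t = (t0.1, t0.2 + 2)
        · subst h2
          rw [if_pos rfl, ih]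
          simp [List.count_cons, pair_ne_two, pair_ne_onetwo, pair_ne_twoone, h0, Ne.symm h0]
        · rw [if_neg h2, ih]
          simp [List.count_cons, h0, Ne.symm h0, h1, Ne.symm h1, h2, Ne.symm h2]

-- proof-side functional model of the counter-guided removal pass
def goF (f : (Int × Int) → Int) : List (Int × Int) → List (Int × Int)
  | [] => []
  | t :: r => if 0 < f t then goF (Function.update f t (f t - 1)) r else t :: goF f r

lemma drop_fold_eq_goF (l : List (Int × Int)) :
    ∀ (d : PySem.Dict (Int × Int) Int) (out : List (Int × Int)),
      (l.foldl dropStep (d, out)).2 = out ++ goF (fun t => d.getD t 0) l := by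
  induction l with
  | nil => intro d out; simp [goF]
  | cons t r ih =>
    intro d out
    simp only [List.foldl_cons, dropStep, goF]
    by_cases hd : 0 < d.getD t 0
    · rw [if_pos hd, if_pos hd, ih]
      congr 2
      funext t'
      rw [PySem.Dict.getD_insert]
      simp [Function.update_apply]
    · rw [if_neg hd, if_neg hd, ih]
      simp

lemma dropFirst_eq_goF (state targets : List (Int × Int)) :
    dropFirst state targets = goF (fun t => (targets.count t : Int)) state := by
  unfold dropFirst
  rw [drop_fold_eq_goF]
  simp only [List.nil_append]
  congr 1
  funext t
  rw [PySem.Dict.getD_foldl_insert_add_one]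
  simp

lemma goF_erase (l : List (Int × Int)) :
    ∀ (f : (Int × Int) → Int) (v : Int × Int), v ∈ l → 0 < f v →
      goF f l = goF (Function.update f v (f v - 1)) (l.erase v) := by
  induction l with
  | nil => intro f v hv; cases hv
  | cons t r ih =>
    intro f v hv hf
    by_cases h0 : t = v
    · subst h0
      rw [List.erase_cons_head]
      simp only [goF]
      rw [if_pos hf]
    · have hvt : v ≠ t := fun h => h0 h.symm
      have hvr : v ∈ r := by cases hv with
        | head => exact absurd rfl h0
        | tail _ h => exact h
      rw [List.erase_cons_tail (by simp [h0])]
      simp only [goF]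
      by_cases hft : 0 < f t
      · rw [if_pos hft, if_pos (by rw [Function.update_apply, if_neg h0]; exact hft)]
        rw [ih _ v hvr (by rw [Function.update_apply, if_neg hvt]; exact hf)]
        congr 1
        rw [Function.update_apply, if_neg hvt, Function.update_apply, if_neg h0]
        exact Function.update_comm h0 _ _ f
      · rw [if_neg hft, if_neg (by rw [Function.update_apply, if_neg h0]; exact hft)]
        rw [ih f v hvr hf]

lemma goF_of_nonpos (l : List (Int × Int)) :
    ∀ (f : (Int × Int) → Int), (∀ t ∈ l, f t ≤ 0) → goF f l = l := by
  induction l with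
  | nil => intro f _; simp [goF]
  | cons t r ih =>
    intro f hf
    simp only [goF]
    rw [if_neg (by have := hf t (by simp); omega), ih f (fun t ht => hf t (by simp [ht]))]

lemma triplet_drop (state : List (Int × Int)) (x : Int × Int)
    (h : 3 ≤ state.count x) :
    dropFirst state [x, x, x] = ((state.erase x).erase x).erase x := by
  have hx1 : x ∈ state := List.count_pos_iff.mp (by omega)
  have hc1 : (state.erase x).count x = state.count x - 1 := List.count_erase_self
  have hx2 : x ∈ state.erase x := List.count_pos_iff.mp (by omega)
  have hc2 : ((state.erase x).erase x).count x = (state.erase x).count x - 1 :=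
    List.count_erase_self
  have hx3 : x ∈ (state.erase x).erase x := List.count_pos_iff.mp (by omega)
  rw [dropFirst_eq_goF]
  have e0 : (fun t => (([x, x, x] : List (Int × Int)).count t : Int)) =
      fun t => if t = x then 3 else 0 := by
    funext t
    by_cases ht : t = x
    · subst ht; simp
    · rw [if_neg ht]
      have : ([x, x, x] : List (Int × Int)).count t = 0 := by
        rw [List.count_eq_zero]; simp [ht]
      rw [this]; rfl
  rw [e0]
  rw [goF_erase state _ x hx1 (by simp)]
  rw [goF_erase _ _ x hx2 (by simp [Function.update_apply])]
  rw [goF_erase _ _ x hx3 (by simp [Function.update_apply])]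
  apply goF_of_nonpos
  intro t _
  by_cases ht : t = x <;> simp [Function.update_apply, ht]

lemma run_drop (state : List (Int × Int)) (x y z : Int × Int)
    (hxy : x ≠ y) (hxz : x ≠ z) (hyz : y ≠ z)
    (hx : x ∈ state) (hy : y ∈ state) (hz : z ∈ state) :
    dropFirst state [x, y, z] = ((state.erase x).erase y).erase z := by
  have hy1 : y ∈ state.erase x := (List.mem_erase_of_ne (Ne.symm hxy)).mpr hy
  have hz1 : z ∈ state.erase x := (List.mem_erase_of_ne (Ne.symm hxz)).mpr hz
  have hz2 : z ∈ (state.erase x).erase y := (List.mem_erase_of_ne (Ne.symm hyz)).mpr hz1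
  rw [dropFirst_eq_goF]
  have e0 : (fun t => (([x, y, z] : List (Int × Int)).count t : Int)) =
      fun t => (if t = x then (1 : Int) else 0) + (if t = y then 1 else 0) +
        (if t = z then 1 else 0) := by
    funext t
    simp only [List.count_cons, List.count_nil]
    by_cases h1 : t = x
    · subst h1; simp [hxy, hxz, hyz, Ne.symm hxy, Ne.symm hxz, Ne.symm hyz]
    · by_cases h2 : t = y
      · subst h2; simp [hxy, hxz, hyz, Ne.symm hxy, Ne.symm hxz, Ne.symm hyz]
      · by_cases h3 : t = z
        · subst h3; simp [hxy, hxz, hyz, Ne.symm hxy, Ne.symm hxz, Ne.symm hyz]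
        · simp [h1, h2, h3, Ne.symm h1, Ne.symm h2, Ne.symm h3]
  rw [e0]
  rw [goF_erase state _ x hx (by simp [hxy, hxz])]
  rw [goF_erase _ _ y hy1
    (by simp [Function.update_apply, Ne.symm hxy, hyz])]
  rw [goF_erase _ _ z hz2
    (by simp [Function.update_apply, Ne.symm hxz, Ne.symm hyz])]
  apply goF_of_nonpos
  intro t _
  by_cases h1 : t = z
  · subst h1; simp [Function.update_apply, Ne.symm hxz, Ne.symm hyz]
  · by_cases h2 : t = y
    · subst h2; simp [Function.update_apply, Ne.symm hxy, hyz, h1]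
    · by_cases h3 : t = x
      · subst h3; simp [Function.update_apply, h1, h2]
      · simp [Function.update_apply, h1, h2, h3]

lemma removeThree_eq_some (state : List (Int × Int)) (a b c : Int × Int)
    (ha : a ∈ state) (hb : b ∈ state.erase a) (hc : c ∈ (state.erase a).erase b) :
    removeThreeTiles state a b c = some (((state.erase a).erase b).erase c) := by
  unfold removeThreeTiles
  simp only [PySem.List.remove?_eq_some_erase state a ha,
    PySem.List.remove?_eq_some_erase (state.erase a) b hb,
    PySem.List.remove?_eq_some_erase ((state.erase a).erase b) c hc]

lemma isSeq_lt (t0 : Int × Int) (rest : List (Int × Int)) (hs : t0.1 < 3) :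
    isSequencePossible (t0 :: rest) =
      (decide ((t0.1, t0.2 + 1) ∈ t0 :: rest) && decide ((t0.1, t0.2 + 2) ∈ t0 :: rest)) := by
  obtain ⟨s, v⟩ := t0
  have : ¬ s = 3 := by simp at hs; omega
  simp [isSequencePossible, this]

lemma check_cons (t0 : Int × Int) (rest : List (Int × Int)) :
    check_4_melds (t0 :: rest) =
      ((if 3 ≤ (t0 :: rest).count t0 then
          check_4_melds ((((t0 :: rest).erase t0).erase t0).erase t0) else false) ||
       (if t0.1 < 3 ∧ (t0.1, t0.2 + 1) ∈ t0 :: rest ∧ (t0.1, t0.2 + 2) ∈ t0 :: rest then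
          check_4_melds ((((t0 :: rest).erase t0).erase (t0.1, t0.2 + 1)).erase
            (t0.1, t0.2 + 2))
        else false)) := by
  rw [check_4_melds]
  congr 1
  · by_cases hG1 : 3 ≤ (t0 :: rest).count t0
    · rw [if_pos hG1, if_pos hG1]
      have hm1 : t0 ∈ t0 :: rest := List.mem_cons_self
      have hc1 : ((t0 :: rest).erase t0).count t0 = (t0 :: rest).count t0 - 1 :=
        List.count_erase_self
      have hm2 : t0 ∈ (t0 :: rest).erase t0 := List.count_pos_iff.mp (by omega)
      have hc2 : (((t0 :: rest).erase t0).erase t0).count t0 =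
          ((t0 :: rest).erase t0).count t0 - 1 := List.count_erase_self
      have hm3 : t0 ∈ ((t0 :: rest).erase t0).erase t0 := List.count_pos_iff.mp (by omega)
      have hrem3 := removeThree_eq_some (t0 :: rest) t0 t0 t0 hm1 hm2 hm3
      split
      next nl hnl => rw [hrem3] at hnl; injection hnl with h; rw [← h]
      next hnl => rw [hrem3] at hnl; simp at hnl
    · rw [if_neg hG1, if_neg hG1]
  · by_cases hs : t0.1 < 3
    · rw [if_pos hs, isSeq_lt t0 rest hs]
      by_cases hy : (t0.1, t0.2 + 1) ∈ t0 :: rest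
      · by_cases hz : (t0.1, t0.2 + 2) ∈ t0 :: rest
        · have hmx : t0 ∈ t0 :: rest := List.mem_cons_self
          have hmy : (t0.1, t0.2 + 1) ∈ (t0 :: rest).erase t0 :=
            (List.mem_erase_of_ne (pair_ne_one t0)).mpr hy
          have hmz : (t0.1, t0.2 + 2) ∈ ((t0 :: rest).erase t0).erase (t0.1, t0.2 + 1) :=
            (List.mem_erase_of_ne (pair_ne_twoone t0)).mpr
              ((List.mem_erase_of_ne (pair_ne_two t0)).mpr hz)
          have hrem4 := removeThree_eq_some (t0 :: rest) t0 (t0.1, t0.2 + 1)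
            (t0.1, t0.2 + 2) hmx hmy hmz
          simp only [hy, hz, decide_true, Bool.and_self, if_true, true_and, and_true]
          rw [if_pos hs]
          split
          next nl hnl => rw [hrem4] at hnl; injection hnl with h; rw [← h]
          next hnl => rw [hrem4] at hnl; simp at hnl
        · simp [hz]
      · simp [hy]
    · rw [if_neg hs, if_neg (fun hh => hs hh.1)]

theorem solve_spec :
    ∀ (n : Nat) (state : List (Int × Int)) (cache : PySem.Dict (List (Int × Int)) Bool),
      state.length ≤ n →
      (∀ k b, cache.get? k = some b → b = check_4_melds k) →
      (solve state cache).1 = check_4_melds state ∧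
      (∀ k b, (solve state cache).2.get? k = some b → b = check_4_melds k) := by
  intro n
  induction n with
  | zero =>
    intro state cache hlen hc
    cases state with
    | nil => exact ⟨by simp [solve, check_4_melds], by simpa [solve] using hc⟩
    | cons a b => simp at hlen
  | succ n ih =>
    intro state cache hlen hc
    cases state with
    | nil => exact ⟨by simp [solve, check_4_melds], by simpa [solve] using hc⟩
    | cons t0 rest =>
      cases hg : cache.get? (t0 :: rest) with
      | some r =>
        refine ⟨?_, ?_⟩
        · simp only [solve, hg]; exact hc _ _ hg
        · simp only [solve, hg]; exact hc
      | none =>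
        have hscan : ((t0 :: rest).foldl (scanStep t0) ((0 : Int), false, false)) =
            ((((t0 :: rest).count t0 : Nat) : Int), decide ((t0.1, t0.2 + 1) ∈ t0 :: rest),
              decide ((t0.1, t0.2 + 2) ∈ t0 :: rest)) := by
          rw [scan_spec]; simp
        simp only [solve, hg, hscan]
        -- the first (triplet) attempt p1
        have hp1 : ∀ p1 : Bool × PySem.Dict (List (Int × Int)) Bool,
            p1 = (if (3 : Int) ≤ (((t0 :: rest).count t0 : Nat) : Int)
              then solve (dropFirst (t0 :: rest) [t0, t0, t0]) cache else (false, cache)) →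
            (p1.1 = (if 3 ≤ (t0 :: rest).count t0 then
                check_4_melds ((((t0 :: rest).erase t0).erase t0).erase t0) else false) ∧
             (∀ k b, p1.2.get? k = some b → b = check_4_melds k)) := by
          intro p1 hp1def
          by_cases hG1 : 3 ≤ (t0 :: rest).count t0
          · have hm1 : t0 ∈ t0 :: rest := List.mem_cons_self
            have hc1 : ((t0 :: rest).erase t0).count t0 = (t0 :: rest).count t0 - 1 :=
              List.count_erase_self
            have hm2 : t0 ∈ (t0 :: rest).erase t0 := List.count_pos_iff.mp (by omega)
            have hc2 : (((t0 :: rest).erase t0).erase t0).count t0 =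
                ((t0 :: rest).erase t0).count t0 - 1 := List.count_erase_self
            have hm3 : t0 ∈ ((t0 :: rest).erase t0).erase t0 := List.count_pos_iff.mp (by omega)
            have hlen3 : ((((t0 :: rest).erase t0).erase t0).erase t0).length ≤ n := by
              have e1 := List.length_erase_of_mem hm1
              have e2 := List.length_erase_of_mem hm2
              have e3 := List.length_erase_of_mem hm3
              simp only [List.length_cons] at e1 hlen
              omega
            obtain ⟨hih1, hih2⟩ :=
              ih ((((t0 :: rest).erase t0).erase t0).erase t0) cache hlen3 hc
            constructor
            · rw [hp1def, if_pos (by exact_mod_cast hG1),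
                triplet_drop (t0 :: rest) t0 hG1, if_pos hG1]
              exact hih1
            · rw [hp1def, if_pos (by exact_mod_cast hG1), triplet_drop (t0 :: rest) t0 hG1]
              exact hih2
          · rw [hp1def, if_neg (by exact_mod_cast hG1)]
            exact ⟨by rw [if_neg hG1], hc⟩
        have hmain : ∀ p1 p2 : Bool × PySem.Dict (List (Int × Int)) Bool,
            p1 = (if (3 : Int) ≤ (((t0 :: rest).count t0 : Nat) : Int)
              then solve (dropFirst (t0 :: rest) [t0, t0, t0]) cache else (false, cache)) →
            p2 = (if (!p1.1 && decide (t0.1 < 3) && decide ((t0.1, t0.2 + 1) ∈ t0 :: rest) &&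
                decide ((t0.1, t0.2 + 2) ∈ t0 :: rest)) = true then
                solve (dropFirst (t0 :: rest) [t0, (t0.1, t0.2 + 1), (t0.1, t0.2 + 2)]) p1.2
              else p1) →
            p2.1 = check_4_melds (t0 :: rest) ∧
            (∀ k b, p2.2.get? k = some b → b = check_4_melds k) := by
          intro p1 p2 hp1def hp2def
          obtain ⟨hp1a, hp1inv⟩ := hp1 p1 hp1def
          rw [check_cons]
          cases hp1v : p1.1 with
          | true =>
            have hcond : (!p1.1 && decide (t0.1 < 3) && decide ((t0.1, t0.2 + 1) ∈ t0 :: rest) &&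
                decide ((t0.1, t0.2 + 2) ∈ t0 :: rest)) = false := by simp [hp1v]
            rw [hcond] at hp2def
            simp only [Bool.false_eq_true, if_false] at hp2def
            subst hp2def
            refine ⟨?_, hp1inv⟩
            rw [hp1v, ← hp1a, hp1v, Bool.true_or]
          | false =>
            by_cases hs : t0.1 < 3
            · by_cases hy : (t0.1, t0.2 + 1) ∈ t0 :: rest
              · by_cases hz : (t0.1, t0.2 + 2) ∈ t0 :: rest
                · -- run branch actually taken
                  have hmx : t0 ∈ t0 :: rest := List.mem_cons_self
                  have hmy : (t0.1, t0.2 + 1) ∈ (t0 :: rest).erase t0 :=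
                    (List.mem_erase_of_ne (pair_ne_one t0)).mpr hy
                  have hmz : (t0.1, t0.2 + 2) ∈ ((t0 :: rest).erase t0).erase (t0.1, t0.2 + 1) :=
                    (List.mem_erase_of_ne (pair_ne_twoone t0)).mpr
                      ((List.mem_erase_of_ne (pair_ne_two t0)).mpr hz)
                  have hdrop4 := run_drop (t0 :: rest) t0 (t0.1, t0.2 + 1) (t0.1, t0.2 + 2)
                    (one_ne_pair t0) (two_ne_pair t0) (pair_ne_onetwo t0) hmx hy hz
                  have hlen4 :
                      ((((t0 :: rest).erase t0).erase (t0.1, t0.2 + 1)).erase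
                        (t0.1, t0.2 + 2)).length ≤ n := by
                    have e1 := List.length_erase_of_mem hmx
                    have e2 := List.length_erase_of_mem hmy
                    have e3 := List.length_erase_of_mem hmz
                    simp only [List.length_cons] at e1 hlen
                    omega
                  obtain ⟨hih1, hih2⟩ := ih _ p1.2 hlen4 hp1inv
                  have hcond : (!p1.1 && decide (t0.1 < 3) &&
                      decide ((t0.1, t0.2 + 1) ∈ t0 :: rest) &&
                      decide ((t0.1, t0.2 + 2) ∈ t0 :: rest)) = true := by
                    simp [hp1v, hs, hy, hz]
                  rw [hcond] at hp2def
                  simp only [if_true] at hp2def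
                  rw [hdrop4] at hp2def
                  subst hp2def
                  refine ⟨?_, hih2⟩
                  rw [← hp1a, hp1v, Bool.false_or, if_pos ⟨hs, hy, hz⟩]
                  exact hih1
                · have hcond : (!p1.1 && decide (t0.1 < 3) &&
                      decide ((t0.1, t0.2 + 1) ∈ t0 :: rest) &&
                      decide ((t0.1, t0.2 + 2) ∈ t0 :: rest)) = false := by simp [hz]
                  rw [hcond] at hp2def
                  simp only [Bool.false_eq_true, if_false] at hp2def
                  subst hp2def
                  refine ⟨?_, hp1inv⟩
                  rw [← hp1a, hp1v, Bool.false_or, if_neg (fun hh => hz hh.2.2)]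
              · have hcond : (!p1.1 && decide (t0.1 < 3) &&
                    decide ((t0.1, t0.2 + 1) ∈ t0 :: rest) &&
                    decide ((t0.1, t0.2 + 2) ∈ t0 :: rest)) = false := by simp [hy]
                rw [hcond] at hp2def
                simp only [Bool.false_eq_true, if_false] at hp2def
                subst hp2def
                refine ⟨?_, hp1inv⟩
                rw [← hp1a, hp1v, Bool.false_or, if_neg (fun hh => hy hh.2.1)]
            · have hcond : (!p1.1 && decide (t0.1 < 3) &&
                  decide ((t0.1, t0.2 + 1) ∈ t0 :: rest) &&
                  decide ((t0.1, t0.2 + 2) ∈ t0 :: rest)) = false := by simp [hs]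
              rw [hcond] at hp2def
              simp only [Bool.false_eq_true, if_false] at hp2def
              subst hp2def
              refine ⟨?_, hp1inv⟩
              rw [← hp1a, hp1v, Bool.false_or, if_neg (fun hh => hs hh.1)]
        obtain ⟨h1, h2⟩ := hmain _ _ rfl rfl
        refine ⟨h1, ?_⟩
        intro k b hkb
        rw [PySem.Dict.get?_insert] at hkb
        by_cases hk : k = t0 :: rest
        · rw [if_pos hk] at hkb
          cases hkb
          rw [hk]
          exact h1
        · rw [if_neg hk] at hkb
          exact h2 k b hkb

-- ===== VERDICT (by name: the statement is the Claim_ definition above) =====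
theorem check_4_melds_spec : Claim_equal_check_4_melds := by
  intro tiles _
  unfold Spec_check_4_melds check_4_melds_alt
  have h := solve_spec tiles.length tiles PySem.Dict.empty le_rfl
    (by intro k b hb; simp [PySem.Dict.get?_empty] at hb)
  exact h.1.symm
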